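-- pv_equiv track=rewrite | github.com/kcp288/haiku-generator | haiku_algorithm.py | get_five
-- ===== SOURCE A (Python) =====
-- def total_syllables(fragment,i,j):
-- 	val = 0
-- 	for i in range(i,j+1):
-- 		val += fragment[i]
-- 	return val
--
-- def get_five(sentence):
-- 	start = []
-- 	end = []
-- 	for i in range(0,len(sentence)):
-- 		for j in range(i,len(sentence)):
-- 			syll = total_syllables(sentence,i,j)
-- 			if syll == 5:
-- 				start.append(i)
-- 				end.append(j)
-- 	out = []
-- 	for i in range(0,len(start)):
-- 		t = (start[i],end[i])
-- 		out.append(t)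
-- 	return out
-- ===== SOURCE B (Python) =====
-- def get_five(sentence):
-- 	out = []
-- 	n = len(sentence)
-- 	for i in range(n):
-- 		s = 0
-- 		for j in range(i, n):
-- 			s += sentence[j]
-- 			if s == 5:
-- 				out.append((i, j))
-- 	return out
-- ===== Notes on version B (the rewrite author's own statement) =====
-- stated objective: faster
-- what changed: B keeps a running sum while extending j and appends the pair immediately, removing both the O(n) per-pair re-summation and A's separate start/end lists plus the final zip pass.
import Mathlib
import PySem

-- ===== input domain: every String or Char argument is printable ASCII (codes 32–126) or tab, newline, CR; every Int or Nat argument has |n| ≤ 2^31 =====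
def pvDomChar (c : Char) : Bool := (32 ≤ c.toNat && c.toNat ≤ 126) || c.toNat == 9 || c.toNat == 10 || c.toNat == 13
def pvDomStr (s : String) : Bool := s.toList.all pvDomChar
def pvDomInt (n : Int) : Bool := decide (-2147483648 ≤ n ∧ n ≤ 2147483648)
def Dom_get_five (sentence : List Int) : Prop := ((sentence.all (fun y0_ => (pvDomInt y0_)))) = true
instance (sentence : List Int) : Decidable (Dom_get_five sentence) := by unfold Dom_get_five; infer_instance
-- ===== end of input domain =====

-- B replaces A's O(n^3) recompute-the-sum-per-pair scheme (plus separate start/end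
-- lists and a final zip pass) by an O(n^2) running sum that appends pairs directly.

-- ===== PORT A =====
-- fragment[i] is only ever used with an in-range index here, so pyGetD with default 0 is exact.
def total_syllables (fragment : List Int) (i j : Int) : Int :=
  (PySem.List.pyRange i (j + 1) 1).foldl
    (fun val k => val + PySem.List.pyGetD fragment k 0) 0

def get_five (sentence : List Int) : List (Int × Int) :=
  let n : Int := sentence.length
  let se :=
    (PySem.List.pyRange 0 n 1).foldl (fun (p : List Int × List Int) i =>
      (PySem.List.pyRange i n 1).foldl (fun (p : List Int × List Int) j =>
        if total_syllables sentence i j = 5 then (p.1 ++ [i], p.2 ++ [j]) else p) p)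
      ([], [])
  -- start[i] / end[i] are always in range in this loop, so pyGetD is exact.
  (PySem.List.pyRange 0 (se.1.length : Int) 1).foldl
    (fun out k => out ++ [(PySem.List.pyGetD se.1 k 0, PySem.List.pyGetD se.2 k 0)]) []

-- ===== PORT B =====
def get_five_alt (sentence : List Int) : List (Int × Int) :=
  let n : Int := sentence.length
  (PySem.List.pyRange 0 n 1).foldl (fun out i =>
    ((PySem.List.pyRange i n 1).foldl
      (fun (p : List (Int × Int) × Int) j =>
        let s := p.2 + PySem.List.pyGetD sentence j 0
        (if s = 5 then p.1 ++ [(i, j)] else p.1, s))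
      (out, 0)).1) []

-- ===== PRECONDITION & SPEC =====
def Spec_get_five (sentence : List Int) (out : List (Int × Int)) : Prop := out = get_five_alt sentence
instance (sentence : List Int) (out : List (Int × Int)) : Decidable (Spec_get_five sentence out) := by unfold Spec_get_five; infer_instance

-- ===== CLAIM (what is proved, stated in full; the proofs are below) =====
def Claim_equal_get_five : Prop := ∀ (sentence : List Int), Dom_get_five sentence → Spec_get_five sentence (get_five sentence)

-- ===== LEMMAS AND PROOFS =====

-- the common normal form both programs compute
def pvHits (sentence : List Int) : List (Int × Int) :=
  (PySem.List.pyRange 0 (sentence.length : Int) 1).flatMap (fun i =>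
    ((PySem.List.pyRange i (sentence.length : Int) 1).filter
        (fun j => decide (total_syllables sentence i j = 5))).map (fun j => (i, j)))

theorem total_eq_sum (sentence : List Int) (i j : Int) :
    total_syllables sentence i j =
      ((PySem.List.pyRange i (j + 1) 1).map (fun k => PySem.List.pyGetD sentence k 0)).sum := by
  unfold total_syllables
  rw [PySem.List.foldl_add]
  simp

theorem total_split (sentence : List Int) (i j : Int) (hij : i ≤ j) :
    total_syllables sentence i j
      = total_syllables sentence i (j - 1) + PySem.List.pyGetD sentence j 0 := by
  rw [total_eq_sum, total_eq_sum]
  have h : PySem.List.pyRange i (j + 1) 1 = PySem.List.pyRange i j 1 ++ [j] :=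
    PySem.List.pyRange_one_succ_right hij
  rw [h]
  simp [show j - 1 + 1 = j by ring]

theorem total_empty (sentence : List Int) (i : Int) :
    total_syllables sentence i (i - 1) = 0 := by
  rw [total_eq_sum, PySem.List.pyRange_one_eq_nil (by omega)]
  simp

-- B's inner loop with running sum c = total_syllables sentence i (j-1)
theorem b_inner (sentence : List Int) (n i : Int) :
    ∀ (m : ℕ) (j : Int), i ≤ j → m = (n - j).toNat → ∀ (out : List (Int × Int)),
    ((PySem.List.pyRange j n 1).foldl
      (fun (p : List (Int × Int) × Int) k =>
        let s := p.2 + PySem.List.pyGetD sentence k 0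
        (if s = 5 then p.1 ++ [(i, k)] else p.1, s))
      (out, total_syllables sentence i (j - 1))).1
      = out ++ ((PySem.List.pyRange j n 1).filter
          (fun k => decide (total_syllables sentence i k = 5))).map (fun k => (i, k)) := by
  intro m
  induction m with
  | zero =>
    intro j hij hm out
    rw [PySem.List.pyRange_one_eq_nil (by omega)]
    simp
  | succ m ih =>
    intro j hij hm out
    by_cases hjn : j < n
    · rw [PySem.List.pyRange_one_cons hjn]
      simp only [List.foldl_cons, List.filter_cons]
      have hs : total_syllables sentence i (j - 1) + PySem.List.pyGetD sentence j 0
          = total_syllables sentence i j := (total_split sentence i j hij).symm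
      rw [hs]
      have IH := ih (j + 1) (by omega) (by omega)
        (if total_syllables sentence i j = 5 then out ++ [(i, j)] else out)
      rw [show j + 1 - 1 = j by ring] at IH
      rw [IH]
      by_cases h5 : total_syllables sentence i j = 5 <;> simp [h5]
    · rw [PySem.List.pyRange_one_eq_nil (by omega)]
      simp

theorem b_eq_hits (sentence : List Int) : get_five_alt sentence = pvHits sentence := by
  unfold get_five_alt pvHits
  rw [PySem.List.foldl_congr_mem _ _
    (fun out i => out ++ ((PySem.List.pyRange i (sentence.length : Int) 1).filter
        (fun j => decide (total_syllables sentence i j = 5))).map (fun j => (i, j))) _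
    ?_]
  · rw [PySem.List.foldl_append_eq_flatMap]
    simp
  · intro acc i _
    have h := b_inner sentence (sentence.length : Int) i
      ((sentence.length : Int) - i).toNat i le_rfl rfl acc
    rw [total_empty] at h
    exact h

-- zip of a constant-i list with its source
theorem zip_const_map (i : Int) (l : List Int) :
    (l.map (fun _ => i)).zip l = l.map (fun j => (i, j)) := by
  induction l with
  | nil => simp
  | cons x t ih => rw [List.map_cons, List.zip_cons_cons, ih, List.map_cons]

-- A's double loop produces (starts, ends) whose zip is pvHits
theorem a_pair_loop (sentence : List Int) :
    ∀ (l : List Int) (a b : List Int), a.length = b.length →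
    (let q := l.foldl (fun (p : List Int × List Int) i =>
        (PySem.List.pyRange i (sentence.length : Int) 1).foldl
          (fun (p : List Int × List Int) j =>
            if total_syllables sentence i j = 5 then (p.1 ++ [i], p.2 ++ [j]) else p) p)
        (a, b)
     q.1.length = q.2.length ∧
     q.1.zip q.2 = a.zip b ++ l.flatMap (fun i =>
        ((PySem.List.pyRange i (sentence.length : Int) 1).filter
          (fun j => decide (total_syllables sentence i j = 5))).map (fun j => (i, j)))) := by
  intro l
  induction l with
  | nil => intro a b hab; exact ⟨hab, by simp⟩
  | cons x t ih =>
    intro a b hab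
    simp only [List.foldl_cons]
    have hinner :
        (PySem.List.pyRange x (sentence.length : Int) 1).foldl
          (fun (p : List Int × List Int) j =>
            if total_syllables sentence x j = 5 then (p.1 ++ [x], p.2 ++ [j]) else p) (a, b)
        = (a ++ (((PySem.List.pyRange x (sentence.length : Int) 1).filter
              (fun j => decide (total_syllables sentence x j = 5))).map (fun _ => x)),
           b ++ ((PySem.List.pyRange x (sentence.length : Int) 1).filter
              (fun j => decide (total_syllables sentence x j = 5)))) := by
      rw [PySem.List.foldl_congr_mem _ _
        (fun (p : List Int × List Int) j =>
          ((if total_syllables sentence x j = 5 then p.1 ++ [x] else p.1),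
           (if total_syllables sentence x j = 5 then p.2 ++ [j] else p.2))) _ ?_]
      · rw [PySem.List.foldl_prod_mk
          (f := fun s j => if total_syllables sentence x j = 5 then s ++ [x] else s)
          (g := fun s j => if total_syllables sentence x j = 5 then s ++ [j] else s)]
        rw [PySem.List.foldl_append_ite (p := fun j => total_syllables sentence x j = 5)
              (f := fun _ => x),
            PySem.List.foldl_append_ite_eq_filter (p := fun j => total_syllables sentence x j = 5)]
      · intro acc y _
        by_cases h : total_syllables sentence x y = 5 <;> simp [h]
    rw [hinner]
    set F := ((PySem.List.pyRange x (sentence.length : Int) 1).filter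
        (fun j => decide (total_syllables sentence x j = 5)))
    have hlen : (a ++ F.map (fun _ => x)).length = (b ++ F).length := by
      simp [hab]
    obtain ⟨h1, h2⟩ := ih (a ++ F.map (fun _ => x)) (b ++ F) hlen
    refine ⟨h1, ?_⟩
    rw [h2, List.zip_append (by simp [hab]), zip_const_map]
    simp only [List.flatMap_cons, List.append_assoc]
    rfl

theorem a_eq_hits (sentence : List Int) : get_five sentence = pvHits sentence := by
  unfold get_five
  obtain ⟨hlen, hzip⟩ := a_pair_loop sentence
    (PySem.List.pyRange 0 (sentence.length : Int) 1) [] [] rfl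
  set q := (PySem.List.pyRange 0 (sentence.length : Int) 1).foldl
      (fun (p : List Int × List Int) i =>
        (PySem.List.pyRange i (sentence.length : Int) 1).foldl
          (fun (p : List Int × List Int) j =>
            if total_syllables sentence i j = 5 then (p.1 ++ [i], p.2 ++ [j]) else p) p)
      ([], []) with hq
  simp only [List.nil_append, List.zip_nil_left] at hzip
  show (PySem.List.pyRange 0 (q.1.length : Int) 1).foldl
      (fun out k => out ++ [(PySem.List.pyGetD q.1 k 0, PySem.List.pyGetD q.2 k 0)]) []
      = pvHits sentence
  rw [PySem.List.foldl_append_singleton_eq_map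
    (f := fun k => (PySem.List.pyGetD q.1 k 0, PySem.List.pyGetD q.2 k 0))]
  have : (PySem.List.pyRange 0 (q.1.length : Int) 1).map
      (fun k => (PySem.List.pyGetD q.1 k 0, PySem.List.pyGetD q.2 k 0)) = q.1.zip q.2 := by
    apply List.ext_getElem
    · simp [PySem.List.length_pyRange_one, hlen]
    · intro k hk1 hk2
      have hklt : k < q.1.length := by
        simpa [PySem.List.length_pyRange_one] using hk1
      rw [List.getElem_map, PySem.List.getElem_pyRange_one]
      have hk2' : k < q.2.length := by omega
      rw [List.getElem_zip]
      simp only [Int.zero_add]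
      rw [PySem.List.pyGetD_natCast, PySem.List.pyGetD_natCast,
          List.getD_eq_getElem _ _ hklt, List.getD_eq_getElem _ _ hk2']
  rw [this, hzip]
  rfl

-- ===== VERDICT (by name: the statement is the Claim_ definition above) =====
theorem get_five_spec : Claim_equal_get_five := by
  intro sentence _
  unfold Spec_get_five
  rw [a_eq_hits, b_eq_hits]
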